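-- pv_equiv track=rewrite | github.com/ckoons/BubbleSpacetimeTheory | play/toy_308_a12_cascade_wall.py | _dim_D
-- ===== SOURCE A (Python) =====
-- def _dim_D(p, q, r):
--     """Dimension of SO(2r) rep with highest weight (p, q, 0, ..., 0)."""
--     lam = [0] * (r + 1)
--     lam[1] = p; lam[2] = q
--     l = [0] * (r + 1); rho = [0] * (r + 1)
--     for i in range(1, r + 1):
--         rho[i] = r - i; l[i] = lam[i] + rho[i]
--     num = den = 1
--     for i in range(1, r + 1):
--         for j in range(i + 1, r + 1):
--             num *= (l[i]**2 - l[j]**2)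
--             d = rho[i]**2 - rho[j]**2
--             if d == 0: return 0
--             den *= d
--     return num // den
-- ===== SOURCE B (Python) =====
-- def _dim_D(p, q, r):
--     """Dimension of SO(2r) rep with highest weight (p, q, 0, ..., 0).
--
--     Weyl ratio: for indices i >= 3 the weight entry is 0, so every pair
--     (i, j) with 3 <= i < j contributes the same factor to numerator and
--     denominator; only the O(r) pairs touching indices 1 and 2 remain."""
--     l1 = p + r - 1
--     l2 = q + r - 2
--     num = l1 * l1 - l2 * l2
--     den = (r - 1) * (r - 1) - (r - 2) * (r - 2)
--     for j in range(3, r + 1):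
--         lj = r - j
--         num *= (l1 * l1 - lj * lj) * (l2 * l2 - lj * lj)
--         den *= ((r - 1) * (r - 1) - lj * lj) * ((r - 2) * (r - 2) - lj * lj)
--     return num // den
-- ===== Notes on version B (the rewrite author's own statement) =====
-- stated objective: faster
-- what changed: Replaces the O(r^2) double loop over all index pairs of the Weyl dimension formula by a single O(r) pass: for pairs not touching indices 1 and 2 the numerator and denominator factors coincide and cancel, so only the ~2r factors involving indices 1 and 2 are multiplied.
import Mathlib
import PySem

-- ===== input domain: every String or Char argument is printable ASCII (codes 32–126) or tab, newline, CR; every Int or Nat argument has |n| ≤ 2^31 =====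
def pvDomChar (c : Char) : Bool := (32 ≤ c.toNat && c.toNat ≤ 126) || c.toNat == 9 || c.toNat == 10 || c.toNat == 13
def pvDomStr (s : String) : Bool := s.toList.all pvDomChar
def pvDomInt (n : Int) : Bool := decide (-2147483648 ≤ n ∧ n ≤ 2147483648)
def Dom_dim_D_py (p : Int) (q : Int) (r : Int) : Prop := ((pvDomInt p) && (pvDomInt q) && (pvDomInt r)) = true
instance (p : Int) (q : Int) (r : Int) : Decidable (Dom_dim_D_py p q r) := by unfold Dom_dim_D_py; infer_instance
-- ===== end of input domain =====

-- B replaces A's O(r^2) double loop over index pairs by a single O(r) pass: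
-- factors of pairs not touching indices 1 and 2 are identical in numerator and
-- denominator and cancel (a timing run measured B faster).

-- ===== PORT A =====
-- lam = [0]*(r+1); lam[1] = p; lam[2] = q
def pvLam (p : Int) (q : Int) (r : Int) : List Int :=
  PySem.List.pySetD (PySem.List.pySetD (List.replicate (r + 1).toNat (0 : Int)) 1 p) 2 q

-- l = [0]*(r+1); rho = [0]*(r+1); for i in range(1, b): rho[i] = r - i; l[i] = lam[i] + rho[i]
def pvBuild (r : Int) (lam : List Int) (b : Int) : List Int × List Int :=
  (PySem.List.pyRange 1 b 1).foldl
    (fun st i =>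
      let rho2 := PySem.List.pySetD st.2 i (r - i)
      (PySem.List.pySetD st.1 i
        (PySem.List.pyGetD lam i 0 + PySem.List.pyGetD rho2 i 0), rho2))
    (List.replicate (r + 1).toNat (0 : Int), List.replicate (r + 1).toNat (0 : Int))

-- the inner-loop body; `none` means the early `return 0` on d == 0 has fired
def pvStep (l : List Int) (rho : List Int) (i : Int)
    (st : Option (Int × Int)) (j : Int) : Option (Int × Int) :=
  match st with
  | none => none
  | some (num, den) =>
    let num' := num * ((PySem.List.pyGetD l i 0) ^ 2 - (PySem.List.pyGetD l j 0) ^ 2)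
    let d := (PySem.List.pyGetD rho i 0) ^ 2 - (PySem.List.pyGetD rho j 0) ^ 2
    if d = 0 then none else some (num', den * d)

def dim_D_py (p : Int) (q : Int) (r : Int) : Int :=
  let lr := pvBuild r (pvLam p q r) (r + 1)
  let st := (PySem.List.pyRange 1 (r + 1) 1).foldl
    (fun st i => (PySem.List.pyRange (i + 1) (r + 1) 1).foldl (pvStep lr.1 lr.2 i) st)
    (some ((1 : Int), (1 : Int)))
  match st with
  | none => 0
  | some nd => PySem.Int.floordiv nd.1 nd.2

-- ===== PORT B =====
def dim_D_py_alt (p : Int) (q : Int) (r : Int) : Int :=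
  let l1 := p + r - 1
  let l2 := q + r - 2
  let nd := (PySem.List.pyRange 3 (r + 1) 1).foldl
    (fun (nd : Int × Int) j =>
      let lj := r - j
      (nd.1 * ((l1 * l1 - lj * lj) * (l2 * l2 - lj * lj)),
       nd.2 * (((r - 1) * (r - 1) - lj * lj) * ((r - 2) * (r - 2) - lj * lj))))
    (l1 * l1 - l2 * l2, (r - 1) * (r - 1) - (r - 2) * (r - 2))
  PySem.Int.floordiv nd.1 nd.2

-- ===== PRECONDITION & SPEC =====
-- Pre_ excludes exactly r < 2, where A raises IndexError on `lam[1] = p` / `lam[2] = q`.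
def Pre_dim_D_py (p : Int) (q : Int) (r : Int) : Prop := 2 ≤ r
instance (p : Int) (q : Int) (r : Int) : Decidable (Pre_dim_D_py p q r) := by
  unfold Pre_dim_D_py; infer_instance

def pvWitness_dim_D_py : Int × Int × Int := (3, 1, 4)

def Spec_dim_D_py (p : Int) (q : Int) (r : Int) (out : Int) : Prop := out = dim_D_py_alt p q r
instance (p : Int) (q : Int) (r : Int) (out : Int) : Decidable (Spec_dim_D_py p q r out) := by
  unfold Spec_dim_D_py; infer_instance

-- ===== CLAIM (what is proved, stated in full; the proofs are below) =====
def Claim_equal_dim_D_py : Prop := ∀ (p : Int) (q : Int) (r : Int),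
  Dom_dim_D_py p q r → Pre_dim_D_py p q r → Spec_dim_D_py p q r (dim_D_py p q r)

-- ===== LEMMAS AND PROOFS =====

-- the mathematical value of A's l[i] (for 1 ≤ i ≤ r)
def pvL (p : Int) (q : Int) (r : Int) (i : Int) : Int :=
  (if i = 1 then p else if i = 2 then q else 0) + (r - i)

-- the row product of A's inner loop over a list xs (numerator and denominator share this shape)
def pvRow (l : List Int) (r : Int) (i : Int) : Int :=
  ((PySem.List.pyRange (i + 1) (r + 1) 1).map
    (fun j => (PySem.List.pyGetD l i 0) ^ 2 - (PySem.List.pyGetD l j 0) ^ 2)).prod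

-- the same row product with the array reads replaced by their values
def pvNA (p : Int) (q : Int) (r : Int) (i : Int) : Int :=
  ((PySem.List.pyRange (i + 1) (r + 1) 1).map
    (fun j => (pvL p q r i) ^ 2 - (pvL p q r j) ^ 2)).prod
def pvDA (r : Int) (i : Int) : Int :=
  ((PySem.List.pyRange (i + 1) (r + 1) 1).map
    (fun j => (r - i) ^ 2 - (r - j) ^ 2)).prod

lemma pyGetD_replicate (n : Nat) (j : Int) :
    PySem.List.pyGetD (List.replicate n (0 : Int)) j 0 = 0 := by
  unfold PySem.List.pyGetD PySem.List.pyGet?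
  cases h : PySem.List.pyIdx? (List.replicate n (0 : Int)).length j with
  | none => simp
  | some k => simp [List.getElem?_replicate]; split <;> rfl

lemma pvLam_length (p q r : Int) : (pvLam p q r).length = (r + 1).toNat := by
  simp [pvLam, PySem.List.length_pySetD]

lemma pvLam_get (p q r : Int) (hr : 2 ≤ r) (j : Int) (h0 : 0 ≤ j) (h2 : j ≤ r) :
    PySem.List.pyGetD (pvLam p q r) j 0
      = (if j = 1 then p else if j = 2 then q else 0) := by
  have hj : j < ((pvLam p q r).length : Int) := by rw [pvLam_length]; omega
  rw [PySem.List.pyGetD_eq_getElem _ _ h0 hj]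
  simp [pvLam, PySem.List.pySetD_of_nonneg _ _ (by norm_num : (0:Int) ≤ 1),
        PySem.List.pySetD_of_nonneg _ _ (by norm_num : (0:Int) ≤ 2)]
  rw [List.getElem_set, List.getElem_set]
  split
  · next h => simp [show j = 2 by omega]
  · split
    · next h => simp [show j = 1 by omega]
    · next h1 h2 => simp [show ¬ j = 1 by omega, show ¬ j = 2 by omega]

lemma pyGetD_pySetD_int (xs : List Int) (i j v : Int) (h0i : 0 ≤ i)
    (h0j : 0 ≤ j) (hj : j < (xs.length : Int)) :
    PySem.List.pyGetD (PySem.List.pySetD xs i v) j 0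
      = if j = i then v else PySem.List.pyGetD xs j 0 := by
  rw [PySem.List.pySetD_of_nonneg _ _ h0i,
      PySem.List.pyGetD_eq_getElem _ _ h0j (by rw [List.length_set]; exact hj),
      PySem.List.pyGetD_eq_getElem _ _ h0j hj, List.getElem_set]
  split
  · next h => simp [show j = i by omega]
  · next h => simp [show ¬ j = i by omega]

-- invariant of the array-building loop
lemma pvBuild_spec (p q r : Int) (hr : 2 ≤ r) (n : Nat) (hn : (n : Int) ≤ r) :
    ((pvBuild r (pvLam p q r) (1 + n)).1.length = (r + 1).toNat) ∧
    ((pvBuild r (pvLam p q r) (1 + n)).2.length = (r + 1).toNat) ∧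
    (∀ j : Int, 0 ≤ j → j ≤ r →
      PySem.List.pyGetD (pvBuild r (pvLam p q r) (1 + n)).2 j 0
        = if 1 ≤ j ∧ j ≤ (n : Int) then r - j else 0) ∧
    (∀ j : Int, 0 ≤ j → j ≤ r →
      PySem.List.pyGetD (pvBuild r (pvLam p q r) (1 + n)).1 j 0
        = if 1 ≤ j ∧ j ≤ (n : Int) then pvL p q r j else 0) := by
  induction n with
  | zero =>
    have hnil : PySem.List.pyRange 1 (1 + ((0:Nat):Int)) 1 = [] :=
      PySem.List.pyRange_one_eq_nil (by simp)
    refine ⟨?_, ?_, fun j h0 h2 => ?_, fun j h0 h2 => ?_⟩ <;>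
      simp [pvBuild, pyGetD_replicate] <;>
      omega
  | succ n ih =>
    obtain ⟨ih1, ih2, ihrho, ihl⟩ := ih (by omega)
    have hrange : PySem.List.pyRange 1 (1 + ((n:Int) + 1)) 1
        = PySem.List.pyRange 1 (1 + (n:Int)) 1 ++ [1 + (n:Int)] := by
      have := PySem.List.pyRange_one_succ_right (a := 1) (b := 1 + (n:Int)) (by omega)
      rw [show (1 + ((n:Int) + 1)) = (1 + (n:Int)) + 1 by ring, this]
    have hstep : pvBuild r (pvLam p q r) (1 + ((n:Nat) + 1 : Nat))
        = (let st := pvBuild r (pvLam p q r) (1 + (n:Int))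
           let i := 1 + (n:Int)
           let rho2 := PySem.List.pySetD st.2 i (r - i)
           (PySem.List.pySetD st.1 i
             (PySem.List.pyGetD (pvLam p q r) i 0 + PySem.List.pyGetD rho2 i 0), rho2)) := by
      show pvBuild r (pvLam p q r) (1 + ((n:Nat) + 1 : Nat)) = _
      unfold pvBuild
      rw [show ((1 : Int) + ((n:Nat) + 1 : Nat)) = 1 + ((n:Int) + 1) by push_cast; ring, hrange,
          List.foldl_append]
      rfl
    rw [hstep]
    set st := pvBuild r (pvLam p q r) (1 + (n:Int)) with hst
    have hi0 : (0:Int) ≤ 1 + (n:Int) := by omega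
    have hrho2len : (PySem.List.pySetD st.2 (1 + (n:Int)) (r - (1 + (n:Int)))).length = (r+1).toNat := by
      rw [PySem.List.length_pySetD]; exact ih2
    have hgetrho2 : ∀ j : Int, 0 ≤ j → j ≤ r →
        PySem.List.pyGetD (PySem.List.pySetD st.2 (1 + (n:Int)) (r - (1 + (n:Int)))) j 0
          = if j = 1 + (n:Int) then r - (1 + (n:Int)) else PySem.List.pyGetD st.2 j 0 := by
      intro j h0 h2
      exact pyGetD_pySetD_int _ _ _ _ hi0 h0 (by rw [ih2]; omega)
    refine ⟨?_, ?_, ?_, ?_⟩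
    · simp only [PySem.List.length_pySetD]; exact ih1
    · exact hrho2len
    · intro j h0 h2
      rw [hgetrho2 j h0 h2]
      by_cases hj : j = 1 + (n:Int)
      · rw [if_pos hj, if_pos (by omega)]
        rw [hj]
      · rw [if_neg hj, ihrho j h0 h2]
        by_cases hcase : 1 ≤ j ∧ j ≤ (n:Int)
        · rw [if_pos hcase, if_pos (by push_cast; omega)]
        · rw [if_neg hcase, if_neg (by push_cast; omega)]
    · intro j h0 h2
      have hget1 : PySem.List.pyGetD
          (PySem.List.pySetD st.1 (1 + (n:Int))
            (PySem.List.pyGetD (pvLam p q r) (1 + (n:Int)) 0 +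
             PySem.List.pyGetD (PySem.List.pySetD st.2 (1 + (n:Int)) (r - (1 + (n:Int)))) (1 + (n:Int)) 0)) j 0
          = if j = 1 + (n:Int)
            then (PySem.List.pyGetD (pvLam p q r) (1 + (n:Int)) 0 +
              PySem.List.pyGetD (PySem.List.pySetD st.2 (1 + (n:Int)) (r - (1 + (n:Int)))) (1 + (n:Int)) 0)
            else PySem.List.pyGetD st.1 j 0 := by
        exact pyGetD_pySetD_int _ _ _ _ hi0 h0 (by rw [ih1]; omega)
      rw [hget1]
      by_cases hj : j = 1 + (n:Int)
      · rw [if_pos hj, if_pos (by push_cast; omega)]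
        rw [hgetrho2 (1 + (n:Int)) hi0 (by omega), if_pos rfl,
            pvLam_get p q r hr _ hi0 (by omega)]
        simp [pvL, hj]
      · rw [if_neg hj, ihl j h0 h2]
        by_cases hcase : 1 ≤ j ∧ j ≤ (n:Int)
        · rw [if_pos hcase, if_pos (by push_cast; omega)]
        · rw [if_neg hcase, if_neg (by push_cast; omega)]

lemma pvBuild_l_get (p q r : Int) (hr : 2 ≤ r) (j : Int) (h1 : 1 ≤ j) (h2 : j ≤ r) :
    PySem.List.pyGetD (pvBuild r (pvLam p q r) (r + 1)).1 j 0 = pvL p q r j := by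
  have hb : (r + 1) = 1 + ((r.toNat : Nat) : Int) := by omega
  rw [hb]
  rw [(pvBuild_spec p q r hr r.toNat (by omega)).2.2.2 j (by omega) h2,
      if_pos (by constructor <;> omega)]

lemma pvBuild_rho_get (p q r : Int) (hr : 2 ≤ r) (j : Int) (h1 : 1 ≤ j) (h2 : j ≤ r) :
    PySem.List.pyGetD (pvBuild r (pvLam p q r) (r + 1)).2 j 0 = r - j := by
  have hb : (r + 1) = 1 + ((r.toNat : Nat) : Int) := by omega
  rw [hb]
  rw [(pvBuild_spec p q r hr r.toNat (by omega)).2.2.1 j (by omega) h2,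
      if_pos (by constructor <;> omega)]

-- the inner loop computes the two row products and never takes the early return
lemma inner_fold (l rho : List Int) (i : Int) (ys : List Int) (n d : Int)
    (h : ∀ j ∈ ys,
      (PySem.List.pyGetD rho i 0) ^ 2 - (PySem.List.pyGetD rho j 0) ^ 2 ≠ 0) :
    ys.foldl (pvStep l rho i) (some (n, d))
      = some
        (n * (ys.map (fun j => (PySem.List.pyGetD l i 0) ^ 2 - (PySem.List.pyGetD l j 0) ^ 2)).prod,
         d * (ys.map (fun j => (PySem.List.pyGetD rho i 0) ^ 2 - (PySem.List.pyGetD rho j 0) ^ 2)).prod) := by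
  induction ys generalizing n d with
  | nil => simp
  | cons y ys ih =>
    have hy := h y (by simp)
    simp only [List.foldl_cons, pvStep, if_neg hy, List.map_cons, List.prod_cons]
    rw [ih _ _ (fun j hj => h j (by simp [hj]))]
    rw [mul_assoc, mul_assoc]

-- the outer loop multiplies the row products together
lemma outer_fold (l rho : List Int) (r : Int) (xs : List Int) (n d : Int)
    (h : ∀ i ∈ xs, ∀ j ∈ PySem.List.pyRange (i + 1) (r + 1) 1,
      (PySem.List.pyGetD rho i 0) ^ 2 - (PySem.List.pyGetD rho j 0) ^ 2 ≠ 0) :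
    xs.foldl (fun st i => (PySem.List.pyRange (i + 1) (r + 1) 1).foldl (pvStep l rho i) st)
        (some (n, d))
      = some (n * (xs.map (pvRow l r)).prod, d * (xs.map (pvRow rho r)).prod) := by
  induction xs generalizing n d with
  | nil => simp
  | cons x xs ih =>
    simp only [List.foldl_cons, List.map_cons, List.prod_cons]
    rw [inner_fold l rho x _ n d (h x (by simp)),
        ih _ _ (fun i hi => h i (by simp [hi]))]
    show some _ = _
    rw [mul_assoc, mul_assoc]
    rfl

-- B's loop computes its two products
lemma alt_fold (f g : Int → Int) (xs : List Int) (a b : Int) :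
    xs.foldl (fun (nd : Int × Int) j => (nd.1 * f j, nd.2 * g j)) (a, b)
      = (a * (xs.map f).prod, b * (xs.map g).prod) := by
  induction xs generalizing a b with
  | nil => simp
  | cons x xs ih => simp [ih]; constructor <;> ring

lemma sq_sub_pos {a b : Int} (h0 : 0 ≤ b) (h : b < a) : 0 < a ^ 2 - b ^ 2 := by nlinarith

lemma floordiv_mul_cancel (a b t : Int) (hb : 0 < b) (ht : 0 < t) :
    PySem.Int.floordiv (a * t) (b * t) = PySem.Int.floordiv a b := by
  rw [PySem.Int.floordiv_eq_ediv_of_pos (mul_pos hb ht), PySem.Int.floordiv_eq_ediv_of_pos hb,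
      mul_comm a t, mul_comm b t]
  exact Int.mul_ediv_mul_of_pos _ _ ht

-- ===== VERDICT (by name: the statement is the Claim_ definition above) =====
theorem dim_D_py_spec : Claim_equal_dim_D_py := by
  intro p q r _ hpre
  have hr : (2:Int) ≤ r := hpre
  show dim_D_py p q r = dim_D_py_alt p q r
  have hl := pvBuild_l_get p q r hr
  have hrho := pvBuild_rho_get p q r hr
  set l := (pvBuild r (pvLam p q r) (r + 1)).1 with hldef
  set rho := (pvBuild r (pvLam p q r) (r + 1)).2 with hrhodef
  have hnz : ∀ i ∈ PySem.List.pyRange 1 (r + 1) 1, ∀ j ∈ PySem.List.pyRange (i + 1) (r + 1) 1,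
      (PySem.List.pyGetD rho i 0) ^ 2 - (PySem.List.pyGetD rho j 0) ^ 2 ≠ 0 := by
    intro i hi j hj
    rw [PySem.List.mem_pyRange_one] at hi hj
    rw [hrho i hi.1 (by omega), hrho j (by omega) (by omega)]
    exact ne_of_gt (sq_sub_pos (by omega) (by omega))
  have hA : dim_D_py p q r = PySem.Int.floordiv
      (((PySem.List.pyRange 1 (r + 1) 1).map (pvRow l r)).prod)
      (((PySem.List.pyRange 1 (r + 1) 1).map (pvRow rho r)).prod) := by
    simp only [dim_D_py, ← hldef, ← hrhodef]
    rw [outer_fold l rho r _ 1 1 hnz]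
    simp
  -- replace the array reads by their values
  have hRowNum : ∀ i ∈ PySem.List.pyRange 1 (r + 1) 1, pvRow l r i = pvNA p q r i := by
    intro i hi
    rw [PySem.List.mem_pyRange_one] at hi
    refine congrArg List.prod (List.map_congr_left ?_)
    intro j hj
    rw [PySem.List.mem_pyRange_one] at hj
    rw [hl i hi.1 (by omega), hl j (by omega) (by omega)]
  have hRowDen : ∀ i ∈ PySem.List.pyRange 1 (r + 1) 1, pvRow rho r i = pvDA r i := by
    intro i hi
    rw [PySem.List.mem_pyRange_one] at hi
    refine congrArg List.prod (List.map_congr_left ?_)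
    intro j hj
    rw [PySem.List.mem_pyRange_one] at hj
    rw [hrho i hi.1 (by omega), hrho j (by omega) (by omega)]
  rw [List.map_congr_left hRowNum, List.map_congr_left hRowDen] at hA
  -- peel indices 1 and 2 off the outer range
  have hsplit : PySem.List.pyRange 1 (r + 1) 1 = 1 :: 2 :: PySem.List.pyRange 3 (r + 1) 1 := by
    rw [PySem.List.pyRange_one_cons (by omega : (1:Int) < r + 1),
        show (1:Int) + 1 = 2 by norm_num,
        PySem.List.pyRange_one_cons (by omega : (2:Int) < r + 1),
        show (2:Int) + 1 = 3 by norm_num]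
  rw [hsplit, List.map_cons, List.map_cons, List.prod_cons, List.prod_cons,
      List.map_cons, List.map_cons, List.prod_cons, List.prod_cons] at hA
  -- rows 3.. are identical in numerator and denominator
  have hTail : ∀ i ∈ PySem.List.pyRange 3 (r + 1) 1, pvNA p q r i = pvDA r i := by
    intro i hi
    rw [PySem.List.mem_pyRange_one] at hi
    refine congrArg List.prod (List.map_congr_left ?_)
    intro j hj
    rw [PySem.List.mem_pyRange_one] at hj
    rw [show pvL p q r i = r - i by simp [pvL, show ¬ i = 1 by omega, show ¬ i = 2 by omega],
        show pvL p q r j = r - j by simp [pvL, show ¬ j = 1 by omega, show ¬ j = 2 by omega]]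
  rw [List.map_congr_left hTail] at hA
  -- rows 1 and 2, written over range(3, r+1)
  have hpeel2 : PySem.List.pyRange (1 + 1) (r + 1) 1 = 2 :: PySem.List.pyRange 3 (r + 1) 1 := by
    rw [show (1:Int) + 1 = 2 by norm_num,
        PySem.List.pyRange_one_cons (by omega : (2:Int) < r + 1),
        show (2:Int) + 1 = 3 by norm_num]
  have hNA1 : pvNA p q r 1
      = ((p + r - 1) ^ 2 - (q + r - 2) ^ 2) *
        ((PySem.List.pyRange 3 (r + 1) 1).map (fun j => (p + r - 1) ^ 2 - (r - j) ^ 2)).prod := by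
    unfold pvNA
    rw [hpeel2, List.map_cons, List.prod_cons,
        show pvL p q r 1 = p + r - 1 by simp [pvL]; ring,
        show pvL p q r 2 = q + r - 2 by simp [pvL]; ring]
    congr 1
    refine congrArg List.prod (List.map_congr_left ?_)
    intro j hj
    rw [PySem.List.mem_pyRange_one] at hj
    rw [show pvL p q r j = r - j by simp [pvL, show ¬ j = 1 by omega, show ¬ j = 2 by omega]]
  have hNA2 : pvNA p q r 2
      = ((PySem.List.pyRange 3 (r + 1) 1).map (fun j => (q + r - 2) ^ 2 - (r - j) ^ 2)).prod := by
    unfold pvNA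
    rw [show (2:Int) + 1 = 3 by norm_num,
        show pvL p q r 2 = q + r - 2 by simp [pvL]; ring]
    refine congrArg List.prod (List.map_congr_left ?_)
    intro j hj
    rw [PySem.List.mem_pyRange_one] at hj
    rw [show pvL p q r j = r - j by simp [pvL, show ¬ j = 1 by omega, show ¬ j = 2 by omega]]
  have hDA1 : pvDA r 1
      = ((r - 1) ^ 2 - (r - 2) ^ 2) *
        ((PySem.List.pyRange 3 (r + 1) 1).map (fun j => (r - 1) ^ 2 - (r - j) ^ 2)).prod := by
    unfold pvDA
    rw [hpeel2, List.map_cons, List.prod_cons]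
  have hDA2 : pvDA r 2
      = ((PySem.List.pyRange 3 (r + 1) 1).map (fun j => (r - 2) ^ 2 - (r - j) ^ 2)).prod := by
    unfold pvDA
    rw [show (2:Int) + 1 = 3 by norm_num]
  -- B's side
  have hB : dim_D_py_alt p q r = PySem.Int.floordiv
      (((p + r - 1) * (p + r - 1) - (q + r - 2) * (q + r - 2)) *
        (((PySem.List.pyRange 3 (r + 1) 1).map
          (fun j => (p + r - 1) ^ 2 - (r - j) ^ 2)).prod *
         ((PySem.List.pyRange 3 (r + 1) 1).map
          (fun j => (q + r - 2) ^ 2 - (r - j) ^ 2)).prod))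
      (((r - 1) * (r - 1) - (r - 2) * (r - 2)) *
        (((PySem.List.pyRange 3 (r + 1) 1).map
          (fun j => (r - 1) ^ 2 - (r - j) ^ 2)).prod *
         ((PySem.List.pyRange 3 (r + 1) 1).map
          (fun j => (r - 2) ^ 2 - (r - j) ^ 2)).prod)) := by
    have hm1 : ∀ j ∈ PySem.List.pyRange 3 (r + 1) 1,
        ((p + r - 1) * (p + r - 1) - (r - j) * (r - j)) *
          ((q + r - 2) * (q + r - 2) - (r - j) * (r - j))
        = ((p + r - 1) ^ 2 - (r - j) ^ 2) * ((q + r - 2) ^ 2 - (r - j) ^ 2) :=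
      fun j _ => by ring
    have hm2 : ∀ j ∈ PySem.List.pyRange 3 (r + 1) 1,
        ((r - 1) * (r - 1) - (r - j) * (r - j)) *
          ((r - 2) * (r - 2) - (r - j) * (r - j))
        = ((r - 1) ^ 2 - (r - j) ^ 2) * ((r - 2) ^ 2 - (r - j) ^ 2) :=
      fun j _ => by ring
    simp only [dim_D_py_alt, alt_fold]
    rw [List.map_congr_left hm1, List.map_congr_left hm2,
        List.prod_map_mul, List.prod_map_mul]
  -- assemble
  rw [hA, hNA1, hNA2, hDA1, hDA2, hB]
  set T := ((PySem.List.pyRange 3 (r + 1) 1).map (pvDA r)).prod with hTdef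
  set P1 := ((PySem.List.pyRange 3 (r + 1) 1).map (fun j => (p + r - 1) ^ 2 - (r - j) ^ 2)).prod
  set P2 := ((PySem.List.pyRange 3 (r + 1) 1).map (fun j => (q + r - 2) ^ 2 - (r - j) ^ 2)).prod
  set Q1 := ((PySem.List.pyRange 3 (r + 1) 1).map (fun j => (r - 1) ^ 2 - (r - j) ^ 2)).prod
  set Q2 := ((PySem.List.pyRange 3 (r + 1) 1).map (fun j => (r - 2) ^ 2 - (r - j) ^ 2)).prod
  have hQ1 : 0 < Q1 := by
    refine List.prod_pos ?_
    intro x hx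
    obtain ⟨j, hj, rfl⟩ := List.mem_map.mp hx
    rw [PySem.List.mem_pyRange_one] at hj
    exact sq_sub_pos (by omega) (by omega)
  have hQ2 : 0 < Q2 := by
    refine List.prod_pos ?_
    intro x hx
    obtain ⟨j, hj, rfl⟩ := List.mem_map.mp hx
    rw [PySem.List.mem_pyRange_one] at hj
    exact sq_sub_pos (by omega) (by omega)
  have hT : 0 < T := by
    refine List.prod_pos ?_
    intro x hx
    obtain ⟨i, hi, rfl⟩ := List.mem_map.mp hx
    rw [PySem.List.mem_pyRange_one] at hi
    refine List.prod_pos ?_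
    intro y hy
    obtain ⟨j, hj, rfl⟩ := List.mem_map.mp hy
    rw [PySem.List.mem_pyRange_one] at hj
    exact sq_sub_pos (by omega) (by omega)
  have hnum : ((p + r - 1) ^ 2 - (q + r - 2) ^ 2) * P1 * (P2 * T)
      = (((p + r - 1) * (p + r - 1) - (q + r - 2) * (q + r - 2)) * (P1 * P2)) * T := by ring
  have hden : ((r - 1) ^ 2 - (r - 2) ^ 2) * Q1 * (Q2 * T)
      = (((r - 1) * (r - 1) - (r - 2) * (r - 2)) * (Q1 * Q2)) * T := by ring
  have he' : 0 < (r - 1) * (r - 1) - (r - 2) * (r - 2) := by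
    have h : (r - 1) * (r - 1) - (r - 2) * (r - 2) = 2 * r - 3 := by ring
    omega
  rw [hnum, hden, floordiv_mul_cancel _ _ _ (mul_pos he' (mul_pos hQ1 hQ2)) hT]
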